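-- pv_equiv track=rewrite | github.com/atozto9/algorithm | programmers/programmers/hash-04.py | solution
-- ===== SOURCE A (Python) =====
-- from collections import defaultdict
--
-- def solution(genres, plays):
--     answer = []
--
--     genres_dic = defaultdict(list)
--
--     for i, (g, p) in enumerate(zip(genres, plays)):
--         genres_dic[g].append((i, p))
--
--     sorted_by_total_plays = sorted(genres_dic.items(), key=lambda x: sum([a[1] for a in x[1]]), reverse=True)
--
--     sorted_inside = [sorted(p, key=lambda x: x[1], reverse=True) for g, p in sorted_by_total_plays]
--
--     for p_list in sorted_inside:
--         answer += [x[0] for x in p_list][:2]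
--
--     return answer
-- ===== SOURCE B (Python) =====
-- def solution(genres, plays):
--     order = []   # distinct genres in first-appearance order
--     total = {}   # genre -> running total plays
--     top = {}     # genre -> top-2 (index, plays) maintained online, plays desc / index asc
--     for i, (g, p) in enumerate(zip(genres, plays)):
--         if g not in total:
--             order.append(g)
--             total[g] = 0
--             top[g] = []
--         total[g] = total[g] + p
--         t = top[g]
--         if t and p > t[0][1]:
--             top[g] = [(i, p), t[0]]
--         elif len(t) == 2 and p > t[1][1]:
--             top[g] = [t[0], (i, p)]
--         elif len(t) < 2:
--             top[g] = t + [(i, p)]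
--     order = sorted(order, key=lambda g: total[g], reverse=True)
--     return [i for g in order for i, p in top[g]]
-- ===== Notes on version B (the rewrite author's own statement) =====
-- stated objective: alternative
-- what changed: A buckets songs per genre into a dict, sorts the buckets by total plays, fully sorts inside each bucket and slices the top 2; B makes one pass that keeps running per-genre totals and an online per-genre top-2 list, then sorts only the distinct genres once and concatenates the maintained top-2 lists.
import Mathlib
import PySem

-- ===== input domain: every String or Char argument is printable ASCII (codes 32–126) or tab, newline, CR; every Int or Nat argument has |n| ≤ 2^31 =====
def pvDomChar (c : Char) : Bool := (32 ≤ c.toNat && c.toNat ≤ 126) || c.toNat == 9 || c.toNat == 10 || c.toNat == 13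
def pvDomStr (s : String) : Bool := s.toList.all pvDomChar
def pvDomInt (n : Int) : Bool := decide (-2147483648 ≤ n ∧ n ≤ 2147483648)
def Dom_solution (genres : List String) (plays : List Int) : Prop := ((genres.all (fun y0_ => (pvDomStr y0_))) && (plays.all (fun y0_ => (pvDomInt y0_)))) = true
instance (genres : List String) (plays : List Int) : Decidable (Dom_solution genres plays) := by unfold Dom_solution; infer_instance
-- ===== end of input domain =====

-- B replaces A's bucket-then-two-level-sorts shape with one pass keeping running totals and an
-- online per-genre top-2, then a single sort of the distinct genres (objective: alternative).

-- ===== PORT A =====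
def solution (genres : List String) (plays : List Int) : List Int :=
  let answer : List Int := []
  let genres_dic : PySem.Dict String (List (Int × Int)) :=
    (PySem.List.enumerate (genres.zip plays)).foldl
      (fun d x => d.modify x.2.1 [] (fun l => l ++ [(x.1, x.2.2)])) PySem.Dict.empty
  let sorted_by_total_plays :=
    PySem.List.sorted genres_dic.items (fun x => (x.2.map (fun a => a.2)).sum) true
  let sorted_inside :=
    sorted_by_total_plays.map (fun gp => PySem.List.sorted gp.2 (fun x => x.2) true)
  sorted_inside.foldl (fun answer p_list =>
      answer ++ PySem.List.slice (p_list.map (fun x => x.1)) none (some 2)) answer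

-- ===== PORT B =====
-- _push from Source B; Python reads t[0] / t[1] only under guards that ensure they exist,
-- so the guard chain is ported as a match on the (at most 2-element) list shape (exact).
def solution_push (t : List (Int × Int)) (i p : Int) : List (Int × Int) :=
  match t with
  | [] => [(i, p)]                                        -- len(t) < 2 branch
  | a :: rest =>
    if a.2 < p then [(i, p), a]                           -- t and p > t[0][1]
    else match rest with
      | [] => [a, (i, p)]                                 -- len(t) < 2 branch
      | b :: _ => if b.2 < p then [a, (i, p)] else t      -- len(t) == 2 and p > t[1][1]

-- the body of Source B's single loop over enumerate(zip(genres, plays)); state = (order, total, top).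
-- total[g] / top[g] are read only after g was ensured present, so getD is exact there.
def solution_altStep
    (st : List String × PySem.Dict String Int × PySem.Dict String (List (Int × Int)))
    (x : Int × String × Int) :
    List String × PySem.Dict String Int × PySem.Dict String (List (Int × Int)) :=
  let st := if st.2.1.contains x.2.1 then st
            else (st.1 ++ [x.2.1], st.2.1.insert x.2.1 0, st.2.2.insert x.2.1 [])
  (st.1, st.2.1.insert x.2.1 (st.2.1.getD x.2.1 0 + x.2.2),
   st.2.2.insert x.2.1 (solution_push (st.2.2.getD x.2.1 []) x.1 x.2.2))

def solution_alt (genres : List String) (plays : List Int) : List Int :=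
  let st := (PySem.List.enumerate (genres.zip plays)).foldl solution_altStep
    (([] : List String), (PySem.Dict.empty : PySem.Dict String Int),
     (PySem.Dict.empty : PySem.Dict String (List (Int × Int))))
  let order := PySem.List.sorted st.1 (fun g => st.2.1.getD g 0) true
  order.flatMap (fun g => (st.2.2.getD g []).map (fun x => x.1))

-- ===== PRECONDITION & SPEC =====
def Spec_solution (genres : List String) (plays : List Int) (out : List Int) : Prop := out = solution_alt genres plays
instance (genres : List String) (plays : List Int) (out : List Int) : Decidable (Spec_solution genres plays out) := by unfold Spec_solution; infer_instance

-- ===== CLAIM (what is proved, stated in full; the proofs are below) =====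
def Claim_equal_solution : Prop := ∀ (genres : List String) (plays : List Int), Dom_solution genres plays → Spec_solution genres plays (solution genres plays)

-- ===== LEMMAS AND PROOFS =====

theorem take2_insertBy_take2 {α : Type} (before : α → α → Bool) (x : α) (acc : List α) :
    (PySem.List.insertBy before x acc).take 2
      = (PySem.List.insertBy before x (acc.take 2)).take 2 := by
  match acc with
  | [] => rfl
  | [a] => rfl
  | a :: b :: rest =>
    show (PySem.List.insertBy before x (a :: b :: rest)).take 2
        = (PySem.List.insertBy before x [a, b]).take 2
    simp only [PySem.List.insertBy]
    split
    · rfl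
    · simp only [List.take_succ_cons]
      split <;> simp

-- push is "insert into the plays-descending list, keep the first two" on lists of length ≤ 2
theorem push_eq_take2_insertBy (t : List (Int × Int)) (h : t.length ≤ 2) (i p : Int) :
    solution_push t i p
      = (PySem.List.insertBy (fun a b : Int × Int => decide (b.2 < a.2)) (i, p) t).take 2 := by
  match t with
  | [] => rfl
  | [a] =>
    simp only [solution_push, PySem.List.insertBy]
    by_cases h1 : a.2 < p <;> simp [h1]
  | [a, b] =>
    simp only [solution_push, PySem.List.insertBy]
    by_cases h1 : a.2 < p <;> by_cases h2 : b.2 < p <;> simp [h1, h2]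
  | a :: b :: c :: r => simp at h

theorem take2_foldl_insertBy (xs : List (Int × Int)) (acc : List (Int × Int)) :
    (xs.foldl (fun a x =>
        PySem.List.insertBy (fun a b : Int × Int => decide (b.2 < a.2)) x a) acc).take 2
      = xs.foldl (fun t x => solution_push t x.1 x.2) (acc.take 2) := by
  induction xs generalizing acc with
  | nil => rfl
  | cons y ys ih =>
    simp only [List.foldl_cons]
    rw [ih]
    congr 1
    rw [push_eq_take2_insertBy _ (by simp) y.1 y.2, take2_insertBy_take2]

-- the first two of A's inner stable descending sort are exactly B's online top-2
theorem sorted_take2 (xs : List (Int × Int)) :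
    (PySem.List.sorted xs (fun x => x.2) true).take 2
      = xs.foldl (fun t x => solution_push t x.1 x.2) [] := by
  rw [PySem.List.sorted_rev_eq_foldl_insertBy]
  exact take2_foldl_insertBy xs []

theorem insertBy_map {α β : Type} (f : α → β) (before : β → β → Bool) (x : α) (acc : List α) :
    PySem.List.insertBy before (f x) (acc.map f)
      = (PySem.List.insertBy (fun a b => before (f a) (f b)) x acc).map f := by
  induction acc with
  | nil => rfl
  | cons a t ih =>
    simp only [List.map_cons, PySem.List.insertBy]
    split <;> simp_all

theorem foldl_insertBy_map {α β : Type} (f : α → β) (before : β → β → Bool)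
    (xs : List α) (acc : List α) :
    xs.foldl (fun a x => PySem.List.insertBy before (f x) a) (acc.map f)
      = (xs.foldl (fun a x =>
          PySem.List.insertBy (fun a b => before (f a) (f b)) x a) acc).map f := by
  induction xs generalizing acc with
  | nil => rfl
  | cons y ys ih =>
    simp only [List.foldl_cons]
    rw [insertBy_map, ih]

-- sorting a mapped list is mapping the list sorted under the composed key (same stable sort)
theorem sorted_rev_map {α β κ : Type} [LinearOrder κ] (f : α → β) (key : β → κ) (xs : List α) :
    PySem.List.sorted (xs.map f) key true
      = (PySem.List.sorted xs (fun x => key (f x)) true).map f := by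
  rw [PySem.List.sorted_rev_eq_foldl_insertBy, PySem.List.sorted_rev_eq_foldl_insertBy,
    List.foldl_map]
  exact foldl_insertBy_map f _ xs []

theorem filter_eq_nil_of_not_mem_map (m : List (Int × String × Int)) (g : String)
    (h : g ∉ m.map (fun x => x.2.1)) : m.filter (fun x => x.2.1 == g) = [] := by
  rw [List.filter_eq_nil_iff]
  intro x hx
  simp only [beq_iff_eq]
  intro he
  exact h (List.mem_map.mpr ⟨x, hx, he⟩)

theorem pv_beq_ne {g h : String} (hne : ¬g = h) : (h == g) = false := by
  simp only [beq_eq_false_iff_ne, ne_eq]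
  exact fun he => hne he.symm

-- invariant of B's single pass: order = distinct genres in first-appearance order,
-- total = per-genre play sums, top = per-genre online top-2 fold
theorem solution_alt_inv (l : List (Int × String × Int)) :
    let st := l.foldl solution_altStep
      (([] : List String), (PySem.Dict.empty : PySem.Dict String Int),
       (PySem.Dict.empty : PySem.Dict String (List (Int × Int))))
    st.1 = PySem.Set.ofList (l.map (fun x => x.2.1))
    ∧ (∀ g, st.2.1.contains g = decide (g ∈ l.map (fun x => x.2.1)))
    ∧ (∀ g, st.2.1.getD g 0 = ((l.filter (fun x => x.2.1 == g)).map (fun x => x.2.2)).sum)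
    ∧ (∀ g, st.2.2.getD g []
          = (l.filter (fun x => x.2.1 == g)).foldl (fun t x => solution_push t x.1 x.2.2) []) := by
  induction l using List.reverseRecOn with
  | nil =>
    refine ⟨rfl, ?_, ?_, ?_⟩ <;> intro g <;>
      simp [PySem.Dict.contains_empty, PySem.Dict.getD_empty]
  | append_singleton m x ih =>
    obtain ⟨ih1, ih2, ih3, ih4⟩ := ih
    simp only [List.foldl_append, List.foldl_cons, List.foldl_nil] at *
    set st := m.foldl solution_altStep
      (([] : List String), (PySem.Dict.empty : PySem.Dict String Int),
       (PySem.Dict.empty : PySem.Dict String (List (Int × Int)))) with hst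
    simp only [solution_altStep]
    by_cases hc : st.2.1.contains x.2.1 = true <;>
      simp only [hc, if_false, Bool.false_eq_true, if_pos]
    · -- genre already present
      have hmem : x.2.1 ∈ m.map (fun y => y.2.1) :=
        of_decide_eq_true ((ih2 x.2.1).symm.trans hc)
      refine ⟨?_, ?_, ?_, ?_⟩
      · rw [ih1, List.map_append, PySem.Set.ofList_eq_foldl, PySem.Set.ofList_eq_foldl,
          List.foldl_append]
        simp only [List.map_cons, List.map_nil, List.foldl_cons, List.foldl_nil]
        rw [← PySem.Set.ofList_eq_foldl]
        have hcon : PySem.Set.contains (PySem.Set.ofList (m.map (fun y => y.2.1))) x.2.1 = true :=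
          List.elem_eq_true_of_mem ((PySem.Set.mem_ofList _ _).mpr hmem)
        simp only [PySem.Set.add, hcon, if_true]
      · intro g
        rw [PySem.Dict.contains_insert, ih2 g]
        by_cases hg : g = x.2.1
        · subst hg
          simp [List.map_append]
        · have hb : (g == x.2.1) = false := by simp [hg]
          simp [hb, List.map_append, List.mem_append, hg]
      · intro g
        by_cases hg : g = x.2.1
        · subst hg
          rw [PySem.Dict.getD_insert, if_pos rfl, ih3 x.2.1, List.filter_append,
            List.map_append, List.sum_append]
          simp
        · rw [PySem.Dict.getD_insert, if_neg hg, ih3 g, List.filter_append,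
            List.map_append, List.sum_append]
          simp [List.filter_nil, pv_beq_ne hg]
      · intro g
        by_cases hg : g = x.2.1
        · subst hg
          rw [PySem.Dict.getD_insert, if_pos rfl, ih4 x.2.1, List.filter_append,
            List.foldl_append]
          simp
        · rw [PySem.Dict.getD_insert, if_neg hg, ih4 g, List.filter_append, List.foldl_append]
          simp [List.filter_nil, pv_beq_ne hg]
    · -- new genre
      have hnm : x.2.1 ∉ m.map (fun y => y.2.1) := by
        have h1 := (ih2 x.2.1).symm
        rw [eq_comm] at h1
        intro hmem
        exact hc (h1.trans (decide_eq_true hmem))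
      have hfil : m.filter (fun y => y.2.1 == x.2.1) = [] :=
        filter_eq_nil_of_not_mem_map m x.2.1 hnm
      refine ⟨?_, ?_, ?_, ?_⟩
      · rw [ih1, List.map_append, PySem.Set.ofList_eq_foldl, PySem.Set.ofList_eq_foldl,
          List.foldl_append]
        simp only [List.map_cons, List.map_nil, List.foldl_cons, List.foldl_nil]
        rw [← PySem.Set.ofList_eq_foldl]
        have hcon : PySem.Set.contains (PySem.Set.ofList (m.map (fun y => y.2.1))) x.2.1
            = false := by
          rw [← Bool.not_eq_true]
          intro habs
          exact hnm ((PySem.Set.mem_ofList _ _).mp (List.mem_of_elem_eq_true habs))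
        simp only [PySem.Set.add, hcon, Bool.false_eq_true, if_false]
      · intro g
        rw [PySem.Dict.contains_insert, PySem.Dict.contains_insert, ih2 g]
        by_cases hg : g = x.2.1
        · subst hg
          simp [List.map_append]
        · have hb : (g == x.2.1) = false := by simp [hg]
          simp [hb, List.map_append, List.mem_append, hg]
      · intro g
        by_cases hg : g = x.2.1
        · subst hg
          rw [PySem.Dict.getD_insert, if_pos rfl, PySem.Dict.getD_insert, if_pos rfl,
            List.filter_append, hfil, List.map_append, List.sum_append]
          simp
        · rw [PySem.Dict.getD_insert, if_neg hg, PySem.Dict.getD_insert, if_neg hg, ih3 g,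
            List.filter_append, List.map_append, List.sum_append]
          simp [List.filter_nil, pv_beq_ne hg]
      · intro g
        by_cases hg : g = x.2.1
        · subst hg
          rw [PySem.Dict.getD_insert, if_pos rfl, PySem.Dict.getD_insert, if_pos rfl,
            List.filter_append, hfil, List.foldl_append]
          simp
        · rw [PySem.Dict.getD_insert, if_neg hg, PySem.Dict.getD_insert, if_neg hg, ih4 g,
            List.filter_append, List.foldl_append]
          simp [List.filter_nil, pv_beq_ne hg]

-- A's grouping dict, characterized: keys and per-genre buckets
theorem dictA_keys (E : List (Int × String × Int)) :
    ((E.foldl (fun d x => d.modify x.2.1 [] (fun l => l ++ [(x.1, x.2.2)]))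
        (PySem.Dict.empty : PySem.Dict String (List (Int × Int)))).keys)
      = PySem.Set.ofList (E.map (fun x => x.2.1)) := by
  rw [PySem.Dict.keys_foldl_modify_key E (fun x => x.2.1) []
    (fun d x => fun l => l ++ [(x.1, x.2.2)])]
  rw [PySem.Dict.keys_empty, PySem.Set.ofList_eq_foldl]
  rfl

theorem dictA_getD (E : List (Int × String × Int)) (c : String) :
    ((E.foldl (fun d x => d.modify x.2.1 [] (fun l => l ++ [(x.1, x.2.2)]))
        (PySem.Dict.empty : PySem.Dict String (List (Int × Int)))).getD c [])
      = (E.filter (fun x => x.2.1 == c)).map (fun x => (x.1, x.2.2)) := by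
  have h : E.foldl (fun d x => d.modify x.2.1 [] (fun l => l ++ [(x.1, x.2.2)]))
        (PySem.Dict.empty : PySem.Dict String (List (Int × Int)))
      = (E.map (fun x => (x.2.1, (x.1, x.2.2)))).foldl
          (fun d p => d.modify p.1 [] (fun l => l ++ [p.2])) PySem.Dict.empty := by
    rw [List.foldl_map]
  rw [h, PySem.Dict.getD_foldl_modify_append, PySem.Dict.getD_empty, List.filter_map,
    List.map_map]
  simp [Function.comp_def]

-- ===== VERDICT (by name: the statement is the Claim_ definition above) =====
theorem solution_spec : Claim_equal_solution := by
  unfold Claim_equal_solution Spec_solution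
  intro genres plays _
  show solution genres plays = solution_alt genres plays
  unfold solution solution_alt
  dsimp only
  obtain ⟨inv1, inv2, inv3, inv4⟩ := solution_alt_inv (PySem.List.enumerate (genres.zip plays))
  set E := PySem.List.enumerate (genres.zip plays) with hE
  set st := E.foldl solution_altStep
    (([] : List String), (PySem.Dict.empty : PySem.Dict String Int),
     (PySem.Dict.empty : PySem.Dict String (List (Int × Int)))) with hstdef
  set dA := E.foldl (fun d x => d.modify x.2.1 [] (fun l => l ++ [(x.1, x.2.2)]))
    (PySem.Dict.empty : PySem.Dict String (List (Int × Int))) with hdA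
  -- A's items as buckets over distinct genres
  have hitems : dA.items
      = (PySem.Set.ofList (E.map (fun x => x.2.1))).map
          (fun k => (k, (E.filter (fun x => x.2.1 == k)).map (fun x => (x.1, x.2.2)))) := by
    have hnd : dA.keys.Nodup := by
      rw [hdA, dictA_keys]; exact PySem.Set.nodup_ofList _
    rw [PySem.Dict.items_eq_map_keys dA hnd [], hdA, dictA_keys]
    refine List.map_congr_left ?_
    intro k _
    rw [← hdA, dictA_getD]
  rw [hitems, sorted_rev_map]
  rw [List.map_map, PySem.List.foldl_append_eq_flatMap, List.nil_append, List.flatMap_map,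
    inv1]
  dsimp only
  have hkey : (fun k : String =>
      (List.map (fun a => a.2)
        (List.map (fun x => (x.1, x.2.2)) (List.filter (fun x => x.2.1 == k) E))).sum)
      = (fun g : String => st.2.1.getD g 0) := by
    funext g
    rw [inv3 g]
    simp [List.map_map, Function.comp_def]
  have hfn : (fun k : String =>
      PySem.List.slice
        (List.map (fun x => x.1)
          (PySem.List.sorted
            (List.map (fun x => (x.1, x.2.2)) (List.filter (fun x => x.2.1 == k) E))
            (fun x => x.2) true)) none (some 2))
      = (fun g : String => List.map (fun x => x.1) (st.2.2.getD g [])) := by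
    funext k
    rw [PySem.List.slice_to _ (by norm_num : (0:Int) ≤ 2)]
    have h2 : ((2 : Int).toNat) = 2 := rfl
    rw [h2, ← List.map_take, sorted_take2, List.foldl_map]
    dsimp only
    rw [inv4 k]
  rw [hkey]
  simp only [Function.comp_def]
  rw [hfn]
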